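-- pv_equiv track=rewrite | github.com/sswam/allemande | chat/chat.py | add_blanks_after_code_blocks
-- ===== SOURCE A (Python) =====
-- def add_blanks_after_code_blocks(lines: list[str]) -> list[str]:
--     out = []
--     in_code_block = False
--     code_block_indent = 0
--
--     for i, line in enumerate(lines):
--         out.append(line)
--
--         stripped = line.strip()
--         if not stripped:
--             continue
--
--         indent = len(line) - len(line.lstrip())
--
--         if stripped == "```" and in_code_block:
--             if indent <= code_block_indent:  # Close block if at same or less indent
--                 in_code_block = False
--                 # Add blank line if:
--                 # 1. Next line exists and isn't blank
--                 # 2. Next line isn't another code block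
--                 # 3. Next line isn't less indented
--                 if (
--                     i + 1 < len(lines)
--                     and lines[i + 1].strip()
--                     and not lines[i + 1].strip().startswith("```")
--                     and len(lines[i + 1]) - len(lines[i + 1].lstrip()) <= indent
--                 ):
--                     out.append("")
--
--         elif stripped.startswith("```") and not in_code_block:
--             in_code_block = True
--             code_block_indent = indent
--
--     return out
-- ===== SOURCE B (Python) =====
-- def add_blanks_after_code_blocks(lines: list[str]) -> list[str]:
--     out = []
--     in_code_block = False
--     code_block_indent = 0
--     pending = None  # indent of a just-closed code block; decided on the next line
--
--     for line in lines:
--         stripped = line.strip()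
--         indent = len(line) - len(line.lstrip())
--         if (
--             pending is not None
--             and stripped
--             and not stripped.startswith("```")
--             and indent <= pending
--         ):
--             out.append("")
--         pending = None
--
--         out.append(line)
--         if not stripped:
--             continue
--
--         if stripped == "```" and in_code_block:
--             if indent <= code_block_indent:
--                 in_code_block = False
--                 pending = indent
--         elif stripped.startswith("```") and not in_code_block:
--             in_code_block = True
--             code_block_indent = indent
--
--     return out
-- ===== Notes on version B (the rewrite author's own statement) =====
-- stated objective: alternative
-- what changed: A decides whether to emit a blank line at code-block close time by looking ahead at lines[i+1]; B instead records a pending indent when a block closes and consumes that flag at the top of the next iteration, deciding from the current line, with no lookahead.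
import Mathlib
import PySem

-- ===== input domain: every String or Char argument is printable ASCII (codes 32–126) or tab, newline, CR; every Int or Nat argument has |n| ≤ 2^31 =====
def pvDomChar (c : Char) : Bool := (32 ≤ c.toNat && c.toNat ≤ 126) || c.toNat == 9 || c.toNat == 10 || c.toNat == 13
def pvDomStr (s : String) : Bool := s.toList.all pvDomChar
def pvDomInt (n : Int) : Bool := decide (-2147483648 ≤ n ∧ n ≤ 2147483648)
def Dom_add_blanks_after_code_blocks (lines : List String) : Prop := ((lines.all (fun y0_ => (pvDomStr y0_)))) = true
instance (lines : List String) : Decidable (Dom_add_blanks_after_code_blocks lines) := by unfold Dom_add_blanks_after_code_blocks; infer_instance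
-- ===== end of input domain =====

-- B replaces A's close-time lookahead at lines[i+1] by a deferred 'pending' flag consumed
-- at the top of the next iteration (objective: alternative decomposition, same cost).

-- ===== PORT A =====
-- A's loop body: `out.append(line)`, blank-line `continue`, close a fenced block and
-- look ahead at the immediately following line (the head of the remaining list) to decide
-- whether to append "", or open a block. State: (out, in_code_block, code_block_indent).
def pvALoop (out : List String) (inCodeBlock : Bool) (codeBlockIndent : Int) :
    List String → List String
  | [] => out
  | line :: rest =>
    let out := out ++ [line]
    let stripped := PySem.Str.strip line
    if stripped = "" then
      pvALoop out inCodeBlock codeBlockIndent rest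
    else
      let indent : Int := PySem.Str.len line - PySem.Str.len (PySem.Str.lstrip line)
      if stripped = "```" ∧ inCodeBlock then
        if indent ≤ codeBlockIndent then
          -- lines[i+1] is the head of `rest`
          let out :=
            match rest with
            | [] => out
            | nxt :: _ =>
              if PySem.Str.strip nxt ≠ "" ∧
                 ¬ PySem.Str.startswith (PySem.Str.strip nxt) "```" = true ∧
                 PySem.Str.len nxt - PySem.Str.len (PySem.Str.lstrip nxt) ≤ indent then
                out ++ [""]
              else out
          pvALoop out false codeBlockIndent rest
        else
          pvALoop out inCodeBlock codeBlockIndent rest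
      else
        if PySem.Str.startswith stripped "```" = true ∧ ¬ inCodeBlock = true then
          pvALoop out true indent rest
        else
          pvALoop out inCodeBlock codeBlockIndent rest

def add_blanks_after_code_blocks (lines : List String) : List String :=
  pvALoop [] false 0 lines

-- ===== PORT B =====
-- B's loop body: first consume `pending` (the indent recorded when a block closed on the
-- previous line), possibly emitting "", then append the line and update the state.
-- State: (out, in_code_block, code_block_indent, pending).
def pvBLoop (out : List String) (inCodeBlock : Bool) (codeBlockIndent : Int)
    (pending : Option Int) : List String → List String
  | [] => out
  | line :: rest =>
    let stripped := PySem.Str.strip line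
    let indent : Int := PySem.Str.len line - PySem.Str.len (PySem.Str.lstrip line)
    let out :=
      match pending with
      | some p =>
        if stripped ≠ "" ∧ ¬ PySem.Str.startswith stripped "```" = true ∧ indent ≤ p then
          out ++ [""]
        else out
      | none => out
    let out := out ++ [line]
    if stripped = "" then
      pvBLoop out inCodeBlock codeBlockIndent none rest
    else
      if stripped = "```" ∧ inCodeBlock then
        if indent ≤ codeBlockIndent then
          pvBLoop out false codeBlockIndent (some indent) rest
        else
          pvBLoop out inCodeBlock codeBlockIndent none rest
      else
        if PySem.Str.startswith stripped "```" = true ∧ ¬ inCodeBlock = true then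
          pvBLoop out true indent none rest
        else
          pvBLoop out inCodeBlock codeBlockIndent none rest

def add_blanks_after_code_blocks_alt (lines : List String) : List String :=
  pvBLoop [] false 0 none lines

-- ===== PRECONDITION & SPEC =====
def Spec_add_blanks_after_code_blocks (lines : List String) (out : List String) : Prop := out = add_blanks_after_code_blocks_alt lines
instance (lines : List String) (out : List String) : Decidable (Spec_add_blanks_after_code_blocks lines out) := by unfold Spec_add_blanks_after_code_blocks; infer_instance

-- ===== CLAIM (what is proved, stated in full; the proofs are below) =====
def Claim_equal_add_blanks_after_code_blocks : Prop := ∀ (lines : List String), Dom_add_blanks_after_code_blocks lines → Spec_add_blanks_after_code_blocks lines (add_blanks_after_code_blocks lines)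

-- ===== LEMMAS AND PROOFS =====

-- The blank line A appends at close time, as a function of the following lines and the
-- closing fence's indent.
def pvNextBlank (rest : List String) (p : Int) : List String :=
  match rest with
  | [] => []
  | nxt :: _ =>
    if PySem.Str.strip nxt ≠ "" ∧
       ¬ PySem.Str.startswith (PySem.Str.strip nxt) "```" = true ∧
       PySem.Str.len nxt - PySem.Str.len (PySem.Str.lstrip nxt) ≤ p then
      [""]
    else []

-- Joint invariant: with no pending flag B's loop equals A's; with a pending flag B's loop
-- equals A's started from `out` already extended by the blank A inserted at close time.
theorem pvLoop_eq (rest : List String) :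
    ∀ (out : List String) (b : Bool) (ci : Int),
      pvBLoop out b ci none rest = pvALoop out b ci rest ∧
      ∀ p : Int, pvBLoop out b ci (some p) rest = pvALoop (out ++ pvNextBlank rest p) b ci rest := by
  induction rest with
  | nil =>
    intro out b ci
    refine ⟨rfl, fun p => ?_⟩
    simp [pvBLoop, pvALoop, pvNextBlank]
  | cons line rest ih =>
    intro out b ci
    constructor
    · show pvBLoop out b ci none (line :: rest) = pvALoop out b ci (line :: rest)
      simp only [pvBLoop, pvALoop]
      split_ifs with h1 h2 h3 h4 <;>
        simp_all [(ih _ _ _).1, (ih _ _ _).2, pvNextBlank] <;>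
        cases rest <;> simp_all [pvALoop, pvNextBlank] <;> split_ifs <;> simp_all
    · intro p
      show pvBLoop out b ci (some p) (line :: rest) =
        pvALoop (out ++ pvNextBlank (line :: rest) p) b ci (line :: rest)
      simp only [pvBLoop, pvALoop, pvNextBlank]
      split_ifs with h0 h1 h2 h3 h4 <;>
        simp_all [(ih _ _ _).1, (ih _ _ _).2, pvNextBlank] <;>
        cases rest <;> simp_all [pvALoop, pvNextBlank] <;> split_ifs <;> simp_all

-- ===== VERDICT (by name: the statement is the Claim_ definition above) =====
theorem add_blanks_after_code_blocks_spec : Claim_equal_add_blanks_after_code_blocks := by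
  intro lines _
  show add_blanks_after_code_blocks lines = add_blanks_after_code_blocks_alt lines
  unfold add_blanks_after_code_blocks add_blanks_after_code_blocks_alt
  exact ((pvLoop_eq lines) [] false 0).1.symm
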